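-- pv_equiv track=rewrite | github.com/RamananVr/Leetcodepython | sweep_line_algorithm/2021_Brightest_Position_on_Street.py | brightest_position
-- ===== SOURCE A (Python) =====
-- def brightest_position(lamps):
--     """
--     Finds the position on the street that is illuminated by the most lamps.
--
--     Args:
--     lamps (List[Tuple[int, int]]): A list of tuples where each tuple represents a lamp's position and range.
--
--     Returns:
--     int: The position on the street with the maximum illumination.
--     """
--     from collections import defaultdict
--
--     # Use a sweep line algorithm to track illumination changes
--     illumination_changes = defaultdict(int)
--
--     for position, range_ in lamps:
--         illumination_changes[position - range_] += 1  # Start of illumination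
--         illumination_changes[position + range_ + 1] -= 1  # End of illumination
--
--     # Sort the keys of illumination_changes to process in order
--     sorted_positions = sorted(illumination_changes.keys())
--
--     max_illumination = 0
--     current_illumination = 0
--     brightest_position = None
--
--     for pos in sorted_positions:
--         current_illumination += illumination_changes[pos]
--         if current_illumination > max_illumination:
--             max_illumination = current_illumination
--             brightest_position = pos
--
--     return brightest_position
-- ===== SOURCE B (Python) =====
-- def brightest_position(lamps):
--     """Direct counting: for each candidate event coordinate, count net
--     illumination from scratch; no dict of deltas, no running prefix sum."""
--     starts = [p - r for p, r in lamps]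
--     ends = [p + r + 1 for p, r in lamps]
--     best = None
--     best_count = 0
--     for c in sorted(set(starts + ends)):
--         cnt = sum(1 for s in starts if s <= c) - sum(1 for e in ends if e <= c)
--         if cnt > best_count:
--             best_count = cnt
--             best = c
--     return best
-- ===== Notes on version B (the rewrite author's own statement) =====
-- stated objective: simpler
-- what changed: Replaces the defaultdict-of-deltas sweep with a running prefix sum by a direct per-candidate recount: for each distinct event coordinate the net illumination is computed from scratch by counting starts and ends at or before it, so the dict and the accumulated current_illumination disappear.
import Mathlib
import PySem

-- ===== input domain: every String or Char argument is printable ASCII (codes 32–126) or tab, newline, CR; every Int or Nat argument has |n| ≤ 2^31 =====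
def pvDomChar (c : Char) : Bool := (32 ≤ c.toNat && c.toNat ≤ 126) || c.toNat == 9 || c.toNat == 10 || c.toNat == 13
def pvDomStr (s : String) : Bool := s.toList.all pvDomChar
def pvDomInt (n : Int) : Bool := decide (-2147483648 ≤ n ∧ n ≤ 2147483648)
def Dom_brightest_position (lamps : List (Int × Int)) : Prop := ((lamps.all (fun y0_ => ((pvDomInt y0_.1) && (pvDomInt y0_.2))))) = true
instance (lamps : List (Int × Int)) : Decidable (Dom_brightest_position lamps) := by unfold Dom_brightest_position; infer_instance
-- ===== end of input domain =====

-- B replaces A's defaultdict-of-deltas sweep (running prefix sum) by a direct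
-- per-candidate recount of starts/ends at or before each event coordinate (simpler, no dict).

-- ===== PORT A =====
def brightest_position (lamps : List (Int × Int)) : Option Int :=
  let d := lamps.foldl (fun d pr =>
      (PySem.Dict.modify d (pr.1 - pr.2) 0 (· + 1)).modify (pr.1 + pr.2 + 1) 0 (· - 1))
    PySem.Dict.empty
  let sorted_positions := PySem.List.sorted d.keys (fun x => x) false
  (sorted_positions.foldl (fun (st : Int × Int × Option Int) pos =>
      let cur := st.2.1 + d.getD pos 0
      if st.1 < cur then (cur, cur, some pos) else (st.1, cur, st.2.2))
    (0, 0, none)).2.2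

-- ===== PORT B =====
def brightest_position_alt (lamps : List (Int × Int)) : Option Int :=
  let starts := lamps.map (fun pr => pr.1 - pr.2)
  let ends := lamps.map (fun pr => pr.1 + pr.2 + 1)
  ((PySem.List.sorted (PySem.Set.ofList (starts ++ ends)) (fun x => x) false).foldl
    (fun (st : Int × Option Int) c =>
      let cnt := ((starts.filter (fun s => decide (s ≤ c))).length : Int)
                 - ((ends.filter (fun e => decide (e ≤ c))).length : Int)
      if st.1 < cnt then (cnt, some c) else st)
    (0, none)).2

-- ===== PRECONDITION & SPEC =====
def Spec_brightest_position (lamps : List (Int × Int)) (out : Option Int) : Prop := out = brightest_position_alt lamps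
instance (lamps : List (Int × Int)) (out : Option Int) : Decidable (Spec_brightest_position lamps out) := by unfold Spec_brightest_position; infer_instance

-- ===== CLAIM (what is proved, stated in full; the proofs are below) =====
def Claim_equal_brightest_position : Prop := ∀ (lamps : List (Int × Int)), Dom_brightest_position lamps → Spec_brightest_position lamps (brightest_position lamps)

-- ===== LEMMAS AND PROOFS =====

lemma pv_getD_fold (lamps : List (Int × Int)) (d : PySem.Dict Int Int) (c : Int) :
    (lamps.foldl (fun d pr =>
        (PySem.Dict.modify d (pr.1 - pr.2) 0 (· + 1)).modify (pr.1 + pr.2 + 1) 0 (· - 1)) d).getD c 0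
      = d.getD c 0 + ((lamps.map (fun pr => pr.1 - pr.2)).count c : Int)
          - ((lamps.map (fun pr => pr.1 + pr.2 + 1)).count c : Int) := by
  induction lamps generalizing d with
  | nil => simp
  | cons pr rest ih =>
    simp only [List.foldl_cons, List.map_cons, List.count_cons, beq_iff_eq]
    rw [ih, PySem.Dict.getD_modify]
    by_cases hb : c = pr.1 + pr.2 + 1
    · rw [if_pos hb, PySem.Dict.getD_modify]
      by_cases hab : pr.1 + pr.2 + 1 = pr.1 - pr.2
      · rw [if_pos hab, if_pos (by omega : pr.1 - pr.2 = c), if_pos (by omega : pr.1 + pr.2 + 1 = c), hb, hab]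
        push_cast
        omega
      · rw [if_neg hab, ← hb, if_neg (by omega : ¬ pr.1 - pr.2 = c), if_pos rfl]
        push_cast
        omega
    · rw [if_neg hb, PySem.Dict.getD_modify]
      by_cases ha : c = pr.1 - pr.2
      · rw [if_pos ha, if_pos (by omega : pr.1 - pr.2 = c), if_neg (by omega : ¬ pr.1 + pr.2 + 1 = c), ha]
        push_cast
        omega
      · rw [if_neg ha, if_neg (by omega : ¬ pr.1 - pr.2 = c), if_neg (by omega : ¬ pr.1 + pr.2 + 1 = c)]
        push_cast
        omega

lemma pv_mem_keys_modify (d : PySem.Dict Int Int) (k : Int) (f : Int → Int) (x : Int) :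
    x ∈ (PySem.Dict.modify d k 0 f).keys ↔ x = k ∨ x ∈ d.keys := by
  rw [PySem.Dict.keys_modify]
  exact PySem.Dict.mem_keys_insert _ _ _ _

lemma pv_nodup_keys_modify (d : PySem.Dict Int Int) (k : Int) (f : Int → Int)
    (h : d.keys.Nodup) : (PySem.Dict.modify d k 0 f).keys.Nodup := by
  rw [PySem.Dict.keys_modify]
  exact PySem.Dict.nodup_keys_insert _ _ _ h

lemma pv_mem_keys_fold (lamps : List (Int × Int)) (d : PySem.Dict Int Int) (c : Int) :
    c ∈ (lamps.foldl (fun d pr =>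
        (PySem.Dict.modify d (pr.1 - pr.2) 0 (· + 1)).modify (pr.1 + pr.2 + 1) 0 (· - 1)) d).keys
      ↔ c ∈ d.keys ∨ c ∈ lamps.map (fun pr => pr.1 - pr.2) ++ lamps.map (fun pr => pr.1 + pr.2 + 1) := by
  induction lamps generalizing d with
  | nil => simp
  | cons pr rest ih =>
    simp only [List.foldl_cons, List.map_cons]
    rw [ih]
    simp only [pv_mem_keys_modify, List.mem_append, List.mem_cons]
    tauto

lemma pv_nodup_keys_fold (lamps : List (Int × Int)) (d : PySem.Dict Int Int)
    (hd : d.keys.Nodup) :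
    (lamps.foldl (fun d pr =>
        (PySem.Dict.modify d (pr.1 - pr.2) 0 (· + 1)).modify (pr.1 + pr.2 + 1) 0 (· - 1)) d).keys.Nodup := by
  induction lamps generalizing d with
  | nil => exact hd
  | cons pr rest ih =>
    exact ih _ (pv_nodup_keys_modify _ _ _ (pv_nodup_keys_modify _ _ _ hd))

-- both filter counts at a split point of a strictly increasing list
lemma pv_count_split (l : List Int) (xs ys : List Int) (c : Int)
    (hp : (xs ++ c :: ys).Pairwise (· < ·)) (hall : ∀ s ∈ l, s ∈ xs ++ c :: ys) :
    (l.filter (fun s => decide (s ∈ xs))).length + l.count c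
        = (l.filter (fun s => decide (s ≤ c))).length
    ∧ (l.filter (fun s => decide (s ∈ xs ++ [c]))).length
        = (l.filter (fun s => decide (s ≤ c))).length := by
  have hsplit := List.pairwise_append.mp hp
  have hxc : ∀ x ∈ xs, x < c := fun x hx => hsplit.2.2 x hx c (by simp)
  have hcy : ∀ y ∈ ys, c < y := (List.pairwise_cons.mp hsplit.2.1).1
  induction l with
  | nil => simp
  | cons s l ih =>
    have hs := hall s (by simp)
    obtain ⟨h1, h2⟩ := ih (fun t ht => hall t (by simp [ht]))
    rcases List.mem_append.mp hs with hsx | hsc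
    · have hlt : s < c := hxc s hsx
      simp only [List.filter_cons, List.count_cons, beq_iff_eq]
      rw [if_pos (show (decide (s ∈ xs) = true) from by simp [hsx]),
        if_pos (show (decide (s ∈ xs ++ [c]) = true) from by simp [hsx]),
        if_pos (show (decide (s ≤ c) = true) from by simp [hlt.le]),
        if_neg (show ¬ (s = c) from by omega)]
      simp only [List.length_cons]
      omega
    · rcases List.mem_cons.mp hsc with hEq | hsy
      · have hnx : s ∉ xs := fun hin => absurd (hxc s hin) (by omega)
        simp only [List.filter_cons, List.count_cons, beq_iff_eq]
        rw [if_neg (show ¬ (decide (s ∈ xs) = true) from by simp [hnx]),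
          if_pos (show (decide (s ∈ xs ++ [c]) = true) from by simp [hEq]),
          if_pos (show (decide (s ≤ c) = true) from by simp [hEq]),
          if_pos hEq]
        simp only [List.length_cons]
        omega
      · have hgt : c < s := hcy s hsy
        have hnx : s ∉ xs := fun hin => absurd (hxc s hin) (by omega)
        simp only [List.filter_cons, List.count_cons, beq_iff_eq]
        rw [if_neg (show ¬ (decide (s ∈ xs) = true) from by simp [hnx]),
          if_neg (show ¬ (decide (s ∈ xs ++ [c]) = true) from by
            simp only [decide_eq_true_eq, List.mem_append, List.mem_singleton]
            rintro (h | h)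
            · exact hnx h
            · omega),
          if_neg (show ¬ (decide (s ≤ c) = true) from by
            simp only [decide_eq_true_eq]; omega),
          if_neg (show ¬ (s = c) from by omega)]
        omega

lemma pv_fold_eq (starts ends_ : List Int) (d : PySem.Dict Int Int)
    (hd : ∀ c, d.getD c 0 = ((starts.count c : Int) - (ends_.count c : Int)))
    (L : List Int) (hp : L.Pairwise (· < ·)) (hall : ∀ s ∈ starts ++ ends_, s ∈ L) :
    ∀ ys xs (mx : Int) (best : Option Int), L = xs ++ ys →
      ((ys.foldl (fun (st : Int × Int × Option Int) pos =>
          let cur := st.2.1 + d.getD pos 0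
          if st.1 < cur then (cur, cur, some pos) else (st.1, cur, st.2.2))
        (mx, ((starts.filter (fun s => decide (s ∈ xs))).length : Int)
              - ((ends_.filter (fun s => decide (s ∈ xs))).length : Int), best)).2.2)
      = ((ys.foldl (fun (st : Int × Option Int) c =>
          let cnt := ((starts.filter (fun s => decide (s ≤ c))).length : Int)
                     - ((ends_.filter (fun e => decide (e ≤ c))).length : Int)
          if st.1 < cnt then (cnt, some c) else st)
        (mx, best)).2) := by
  intro ys
  induction ys with
  | nil => intro xs mx best _; rfl
  | cons c ys' ih =>
    intro xs mx best hL
    have hpc : (xs ++ c :: ys').Pairwise (· < ·) := hL ▸ hp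
    have hallc : ∀ s ∈ starts ++ ends_, s ∈ xs ++ c :: ys' := fun s hs => hL ▸ hall s hs
    have hstart := pv_count_split starts xs ys' c hpc
      (fun s hs => hallc s (List.mem_append.mpr (Or.inl hs)))
    have hend := pv_count_split ends_ xs ys' c hpc
      (fun s hs => hallc s (List.mem_append.mpr (Or.inr hs)))
    have hcur : ((starts.filter (fun s => decide (s ∈ xs))).length : Int)
          - ((ends_.filter (fun s => decide (s ∈ xs))).length : Int) + d.getD c 0
        = ((starts.filter (fun s => decide (s ≤ c))).length : Int)
          - ((ends_.filter (fun e => decide (e ≤ c))).length : Int) := by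
      rw [hd c]
      have := hstart.1
      have := hend.1
      push_cast at *
      omega
    have hS : ((starts.filter (fun s => decide (s ∈ xs ++ [c]))).length : Int)
          - ((ends_.filter (fun s => decide (s ∈ xs ++ [c]))).length : Int)
        = ((starts.filter (fun s => decide (s ≤ c))).length : Int)
          - ((ends_.filter (fun e => decide (e ≤ c))).length : Int) := by
      have := hstart.2
      have := hend.2
      push_cast at *
      omega
    have hL' : L = (xs ++ [c]) ++ ys' := by simpa [List.append_assoc] using hL
    simp only [List.foldl_cons]
    rw [show ((mx, ((starts.filter (fun s => decide (s ∈ xs))).length : Int)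
              - ((ends_.filter (fun s => decide (s ∈ xs))).length : Int), best) : Int × Int × Option Int).2.1 + d.getD c 0
        = ((starts.filter (fun s => decide (s ≤ c))).length : Int)
          - ((ends_.filter (fun e => decide (e ≤ c))).length : Int) from hcur]
    by_cases hmx : mx < ((starts.filter (fun s => decide (s ≤ c))).length : Int)
          - ((ends_.filter (fun e => decide (e ≤ c))).length : Int)
    · simp only [hmx, if_pos]
      rw [← hS]
      exact ih (xs ++ [c]) _ _ hL'
    · simp only [hmx, if_false]
      rw [← hS]
      exact ih (xs ++ [c]) _ _ hL'

-- ===== VERDICT (by name: the statement is the Claim_ definition above) =====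
theorem brightest_position_spec : Claim_equal_brightest_position := by
  intro lamps _
  show brightest_position lamps = brightest_position_alt lamps
  simp only [brightest_position, brightest_position_alt]
  have hnodup : (lamps.foldl (fun (d : PySem.Dict Int Int) pr =>
      (PySem.Dict.modify d (pr.1 - pr.2) 0 (· + 1)).modify (pr.1 + pr.2 + 1) 0 (· - 1))
      (PySem.Dict.empty : PySem.Dict Int Int)).keys.Nodup :=
    pv_nodup_keys_fold lamps PySem.Dict.empty (by simp [PySem.Dict.keys_empty])
  have hperm : (lamps.foldl (fun (d : PySem.Dict Int Int) pr =>
      (PySem.Dict.modify d (pr.1 - pr.2) 0 (· + 1)).modify (pr.1 + pr.2 + 1) 0 (· - 1))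
      (PySem.Dict.empty : PySem.Dict Int Int)).keys.Perm
      (PySem.Set.ofList (lamps.map (fun pr => pr.1 - pr.2) ++ lamps.map (fun pr => pr.1 + pr.2 + 1))) := by
    rw [List.perm_ext_iff_of_nodup hnodup (PySem.Set.nodup_ofList _)]
    intro a
    rw [pv_mem_keys_fold, PySem.Set.mem_ofList]
    simp [PySem.Dict.keys_empty]
  rw [PySem.List.sorted_eq_sorted_of_perm _ _ _ (fun a b h => h) hperm]
  have hd : ∀ c, (lamps.foldl (fun (d : PySem.Dict Int Int) pr =>
      (PySem.Dict.modify d (pr.1 - pr.2) 0 (· + 1)).modify (pr.1 + pr.2 + 1) 0 (· - 1))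
      (PySem.Dict.empty : PySem.Dict Int Int)).getD c 0
      = (((lamps.map (fun pr => pr.1 - pr.2)).count c : Int)
        - ((lamps.map (fun pr => pr.1 + pr.2 + 1)).count c : Int)) := by
    intro c
    rw [pv_getD_fold]
    simp [PySem.Dict.getD_empty]
  have hmain := pv_fold_eq (lamps.map (fun pr => pr.1 - pr.2)) (lamps.map (fun pr => pr.1 + pr.2 + 1))
    _ hd
    (PySem.List.sorted (PySem.Set.ofList (lamps.map (fun pr => pr.1 - pr.2) ++ lamps.map (fun pr => pr.1 + pr.2 + 1))) (fun x => x) false)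
    (PySem.List.sorted_ofList_pairwise_lt _)
    (fun s hs => (PySem.List.mem_sorted _ _ _ _).mpr ((PySem.Set.mem_ofList _ _).mpr hs))
    (PySem.List.sorted (PySem.Set.ofList (lamps.map (fun pr => pr.1 - pr.2) ++ lamps.map (fun pr => pr.1 + pr.2 + 1))) (fun x => x) false)
    [] 0 none rfl
  simpa using hmain
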